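-- pv_equiv track=rewrite | github.com/alexandraback/datacollection | solutions_6377668744314880_0/Python/pivizz/c.py | solve0
-- ===== SOURCE A (Python) =====
-- def bisect_left(pt, ar):
--   l = 0
--   r = len(ar)
--   while l != r:
--     m = (l+r)//2
--     if ar[m] >= pt:
--       r = m
--     else:
--       l = m+1
--   return l
--
-- def solve0(pointsq):
--   for i in range(4):
--     pointsq[i].sort()
--   qsizes = [len(pp) for pp in pointsq]
--   res = sum(qsizes)
--   for i in range(4):
--     cut = qsizes[i] + qsizes[(i+1)%4]
--     j = (i + 2) % 4
--     for pt in pointsq[i]: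
--       cut -= 1
--       try:
--         r = bisect_left(pt, pointsq[j])
--       except:
--         print (pt)
--         print (pointsq[j])
--         print (len(pointsq[j]))
--         raise 'aaa'
--       res = min(res, cut + r)
--   return res
-- ===== SOURCE B (Python) =====
-- def solve0(pointsq):
--     # Same in-place sort of the first four lists as A (side effect preserved).
--     for q in pointsq[:4]:
--         q.sort()
--     sizes = [len(q) for q in pointsq]
--     vals = [sum(sizes)]
--     for i in range(4):
--         a = pointsq[i]
--         opp = pointsq[(i + 2) % 4]
--         cut = sizes[i] + sizes[(i + 1) % 4]
--         below = 0
--         k = 0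
--         # two-pointer merge over the two sorted lists: collect every candidate value
--         while k < len(a):
--             if below < len(opp) and opp[below] < a[k]:
--                 below += 1
--             else:
--                 cut -= 1
--                 vals.append(cut + below)
--                 k += 1
--     return min(vals)
-- ===== Notes on version B (the rewrite author's own statement) =====
-- stated objective: alternative
-- what changed: Replaces A's per-point hand-written binary search and running (cut,res) minimum by a single two-pointer merge over each pair of opposite sorted lists that collects all candidate cut values into one list, returning min of that list at the end.
import Mathlib
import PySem

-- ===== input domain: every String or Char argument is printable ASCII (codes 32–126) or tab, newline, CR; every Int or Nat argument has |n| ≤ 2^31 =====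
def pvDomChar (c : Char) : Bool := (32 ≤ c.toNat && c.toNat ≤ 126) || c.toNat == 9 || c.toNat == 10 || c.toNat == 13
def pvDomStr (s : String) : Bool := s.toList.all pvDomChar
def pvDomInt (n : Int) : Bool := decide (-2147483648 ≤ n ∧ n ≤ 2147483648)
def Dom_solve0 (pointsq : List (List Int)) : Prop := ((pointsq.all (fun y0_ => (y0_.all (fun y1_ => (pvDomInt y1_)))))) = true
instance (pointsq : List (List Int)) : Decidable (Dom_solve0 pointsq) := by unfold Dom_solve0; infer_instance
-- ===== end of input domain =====

-- B replaces A's per-point binary search and running (cut,res) minimum by a two-pointer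
-- merge over each pair of opposite sorted lists that collects all candidate values into one
-- list and takes min at the end. A sorts its argument's first four lists in place; the
-- equivalence proved here is about the return value (B performs the same mutation).


-- ===== PORT A =====
-- bisect_left's while loop; l ≤ r is an invariant of the Python loop, so its
-- condition `l != r` is written as the equivalent `l < r` (for termination).
def bisectLoop (pt : Int) (ar : List Int) (l r : Nat) : Nat :=
  if _h : l < r then
    let m := (l + r) / 2
    if pt ≤ ar.getD m 0 then bisectLoop pt ar l m else bisectLoop pt ar (m + 1) r
  else l
termination_by r - l
decreasing_by all_goals omega

def bisectLeft (pt : Int) (ar : List Int) : Nat := bisectLoop pt ar 0 ar.length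

-- the body of A's inner `for pt in pointsq[i]` loop, state (cut, res)
def stepA (b : List Int) (st : Int × Int) (pt : Int) : Int × Int :=
  let cut := st.1 - 1
  (cut, min st.2 (cut + (bisectLeft pt b : Int)))

def solve0 (pointsq : List (List Int)) : Int :=
  -- pointsq after `for i in range(4): pointsq[i].sort()`
  let sq := (List.range 4).map (fun i => PySem.List.sorted (pointsq.getD i []) (fun x => x) false)
              ++ pointsq.drop 4
  let qsizes : List Int := sq.map (fun pp => (pp.length : Int))
  (List.range 4).foldl (fun res i =>
    ((sq.getD i []).foldl (stepA (sq.getD ((i + 2) % 4) []))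
      (qsizes.getD i 0 + qsizes.getD ((i + 1) % 4) 0, res)).2) qsizes.sum

-- ===== PORT B =====
-- B's while loop over indices k (into a) and below (into opp), written as the standard
-- structural recursion on the two remaining suffixes; `below` stays the count of consumed
-- opp elements.  Emits every candidate value `cut + below`.
def cand (a opp : List Int) (cut below : Int) : List Int :=
  match a, opp with
  | [], _ => []
  | pt :: a', o :: opp' =>
      if o < pt then cand (pt :: a') opp' cut (below + 1)
      else (cut - 1 + below) :: cand a' (o :: opp') (cut - 1) below
  | _ :: a', [] => (cut - 1 + below) :: cand a' [] (cut - 1) below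
termination_by a.length + opp.length

def solve0_alt (pointsq : List (List Int)) : Int :=
  let sq := (List.range 4).map (fun i => PySem.List.sorted (pointsq.getD i []) (fun x => x) false)
              ++ pointsq.drop 4
  let sizes : List Int := sq.map (fun q => (q.length : Int))
  let vals : List Int := sizes.sum :: (List.range 4).flatMap (fun i =>
      cand (sq.getD i []) (sq.getD ((i + 2) % 4) [])
        (sizes.getD i 0 + sizes.getD ((i + 1) % 4) 0) 0)
  -- min(vals): vals is nonempty by construction
  (PySem.List.min? vals (fun v => v)).getD 0

-- ===== PRECONDITION & SPEC =====
-- A indexes pointsq[0..3]; on fewer than four quadrant lists it raises IndexError (and so does B).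
def Pre_solve0 (pointsq : List (List Int)) : Prop := 4 ≤ pointsq.length
instance (pointsq : List (List Int)) : Decidable (Pre_solve0 pointsq) := by
  unfold Pre_solve0; infer_instance
def pvWitness_solve0 : List (List Int) := [[1, 0], [], [2], [3]]
def Spec_solve0 (pointsq : List (List Int)) (out : Int) : Prop := out = solve0_alt pointsq
instance (pointsq : List (List Int)) (out : Int) : Decidable (Spec_solve0 pointsq out) := by unfold Spec_solve0; infer_instance

-- ===== CLAIM (what is proved, stated in full; the proofs are below) =====
def Claim_equal_solve0 : Prop := ∀ (pointsq : List (List Int)), Dom_solve0 pointsq → Pre_solve0 pointsq → Spec_solve0 pointsq (solve0 pointsq)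

-- ===== LEMMAS AND PROOFS =====
-- cIdx b pt = number of elements of sorted b strictly below pt (first index with pt ≤ b[k])
def cIdx (b : List Int) (pt : Int) : Nat := b.findIdx (fun x => decide (pt ≤ x))

lemma cIdx_le_length (b : List Int) (pt : Int) : cIdx b pt ≤ b.length :=
  List.findIdx_le_length

lemma lt_of_lt_cIdx {b : List Int} {pt : Int} {k : Nat} (hk : k < cIdx b pt)
    (hlen : k < b.length) : b[k] < pt := by
  have := List.not_of_lt_findIdx (hk : k < List.findIdx (fun x => decide (pt ≤ x)) b)
  simpa using this

lemma le_of_cIdx_le {b : List Int} (hb : b.Pairwise (· ≤ ·)) {pt : Int} {k : Nat}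
    (hk : cIdx b pt ≤ k) (hlen : k < b.length) : pt ≤ b[k] := by
  have hc : cIdx b pt < b.length := lt_of_le_of_lt hk hlen
  have h1 : pt ≤ b[cIdx b pt] := by
    have hc' : List.findIdx (fun x => decide (pt ≤ x)) b < b.length := hc
    have := List.findIdx_getElem (w := hc')
    simpa [cIdx] using this
  rcases Nat.eq_or_lt_of_le hk with h | h
  · simpa [h] using h1
  · exact le_trans h1 (List.pairwise_iff_getElem.mp hb _ _ hc hlen h)

lemma bisectLoop_eq {b : List Int} (hb : b.Pairwise (· ≤ ·)) (pt : Int) :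
    ∀ (n l r : Nat), r - l ≤ n → l ≤ cIdx b pt → cIdx b pt ≤ r → r ≤ b.length →
      bisectLoop pt b l r = cIdx b pt := by
  intro n
  induction n with
  | zero =>
    intro l r hn hl hr hlen
    have : l = r := by omega
    rw [bisectLoop]; simp [this]; omega
  | succ n ih =>
    intro l r hn hl hr hlen
    rw [bisectLoop]
    by_cases hlr : l < r
    · simp only [hlr, dif_pos]
      set m := (l + r) / 2 with hm
      by_cases hc : pt ≤ b.getD m 0
      · simp only [hc, if_pos]
        apply ih l m (by omega) hl _ (by omega)
        by_contra h
        push Not at h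
        have hmlen : m < b.length := by omega
        have := lt_of_lt_cIdx h hmlen
        rw [List.getD_eq_getElem b 0 hmlen] at hc
        omega
      · simp only [hc, if_neg, not_false_iff]
        apply ih (m + 1) r (by omega) _ hr hlen
        by_contra h
        push Not at h
        have hmlen : m < b.length := by omega
        have := le_of_cIdx_le hb (by omega : cIdx b pt ≤ m) hmlen
        rw [List.getD_eq_getElem b 0 hmlen] at hc
        omega
    · simp only [hlr, dif_neg, not_false_iff]
      omega

lemma bisectLeft_eq {b : List Int} (hb : b.Pairwise (· ≤ ·)) (pt : Int) :
    bisectLeft pt b = cIdx b pt := by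
  unfold bisectLeft
  exact bisectLoop_eq hb pt b.length 0 b.length (by omega) (by omega)
    (cIdx_le_length b pt) le_rfl

-- The merge recursion, run on the suffix b.drop p with consumed-count p, folds min over
-- exactly the values cut - 1 + cIdx b pt that A's stepA fold takes min with.
lemma cand_fold_eq {b : List Int} (hb : b.Pairwise (· ≤ ·)) :
    ∀ (a : List Int), a.Pairwise (· ≤ ·) →
      ∀ (p : Nat), (∀ x ∈ a, p ≤ cIdx b x) → ∀ (cut res : Int),
        (cand a (b.drop p) cut (p : Int)).foldl min res = (a.foldl (stepA b) (cut, res)).2 := by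
  suffices H : ∀ (n : Nat) (a : List Int), a.Pairwise (· ≤ ·) →
      ∀ (p : Nat), a.length + (b.drop p).length ≤ n → (∀ x ∈ a, p ≤ cIdx b x) →
      ∀ (cut res : Int),
        (cand a (b.drop p) cut (p : Int)).foldl min res = (a.foldl (stepA b) (cut, res)).2 by
    intro a ha p hp cut res
    exact H (a.length + (b.drop p).length) a ha p le_rfl hp cut res
  intro n
  induction n with
  | zero =>
    intro a ha p hn hp cut res
    have : a = [] := by
      cases a with
      | nil => rfl
      | cons x t => simp at hn
    subst this
    simp [cand]
  | succ n ih =>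
    intro a ha p hn hp cut res
    cases a with
    | nil => simp [cand]
    | cons pt a' =>
      have hpa := List.pairwise_cons.mp ha
      have hple : p ≤ cIdx b pt := hp pt List.mem_cons_self
      cases hdp : b.drop p with
      | nil =>
        -- b exhausted: p = b.length = cIdx b pt, emit and recurse on a'
        have hbp : b.length ≤ p := by
          have := congrArg List.length hdp
          simp at this
          omega
        have hcp : cIdx b pt = p :=
          le_antisymm (le_trans (cIdx_le_length b pt) hbp) hple
        rw [cand]
        simp only [List.foldl_cons, stepA, bisectLeft_eq hb, hcp]
        have : cand a' (b.drop p) (cut - 1) (p : Int)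
            = cand a' [] (cut - 1) (p : Int) := by rw [hdp]
        rw [← this, ih a' hpa.2 p (by rw [hdp] at hn ⊢; simp at hn ⊢; omega)
          (fun x hx => hp x (List.mem_cons_of_mem _ hx)) (cut - 1) (min res (cut - 1 + (p : Int)))]
      | cons o opp' =>
        have hlen2 : b.length - p = opp'.length + 1 := by
          have := congrArg List.length hdp
          simpa using this
        have hplen : p < b.length := by omega
        have hbo : b[p] = o := by
          have h0 : (b.drop p)[0]? = some o := by rw [hdp]; rfl
          rw [List.getElem?_drop] at h0
          simpa [List.getElem?_eq_getElem, hplen] using h0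
        have hdp1 : b.drop (p + 1) = opp' := by
          have : b.drop (p + 1) = (b.drop p).drop 1 := by
            rw [List.drop_drop]
          rw [this, hdp]; simp
        by_cases hlt : o < pt
        · -- consume branch: o = b[p] < every element of pt :: a'
          have hstep : ∀ x ∈ pt :: a', p + 1 ≤ cIdx b x := by
            intro x hx
            have hox : o < x := by
              rcases List.mem_cons.mp hx with h | h
              · omega
              · exact lt_of_lt_of_le hlt (hpa.1 x h)
            by_contra h
            push Not at h
            have := le_of_cIdx_le hb (by omega : cIdx b x ≤ p) hplen
            omega
          have hrec := ih (pt :: a') ha (p + 1)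
            (by rw [hdp1]; simp at hn ⊢; omega) hstep cut res
          rw [hdp1] at hrec
          rw [cand]
          simp only [hlt, if_pos]
          rw [show ((p : Int) + 1) = ((p + 1 : Nat) : Int) by push_cast; ring]
          exact hrec
        · -- emit branch: pt ≤ b[p], so cIdx b pt = p
          have hcp : cIdx b pt = p := by
            have h1 : cIdx b pt ≤ p := by
              by_contra h
              push Not at h
              have := lt_of_lt_cIdx h hplen
              omega
            omega
          rw [cand]
          simp only [hlt, if_neg, not_false_iff, List.foldl_cons, stepA,
            bisectLeft_eq hb, hcp]
          have hrec := ih a' hpa.2 p (by simp at hn ⊢; omega)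
            (fun x hx => hp x (List.mem_cons_of_mem _ hx)) (cut - 1)
            (min res (cut - 1 + (p : Int)))
          rw [hdp] at hrec
          exact hrec

lemma sq_pairwise (l : List Int) :
    (PySem.List.sorted l (fun x => x) false).Pairwise (· ≤ ·) :=
  PySem.List.sorted_pairwise l (fun x => x)

lemma cand_fold_eq0 {b : List Int} (hb : b.Pairwise (· ≤ ·)) (a : List Int)
    (ha : a.Pairwise (· ≤ ·)) (cut res : Int) :
    (cand a b cut 0).foldl min res = (a.foldl (stepA b) (cut, res)).2 := by
  have := cand_fold_eq hb a ha 0 (fun x _ => Nat.zero_le _) cut res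
  simpa using this

-- ===== VERDICT (by name: the statement is the Claim_ definition above) =====
theorem solve0_spec : Claim_equal_solve0 := by
  intro pointsq _ _
  unfold Spec_solve0 solve0 solve0_alt
  simp only [List.range_succ, List.range_zero, List.map_nil, List.map_cons,
    List.nil_append, List.foldl_cons, List.foldl_nil, List.cons_append,
    List.flatMap_cons, List.flatMap_nil, List.append_nil,
    PySem.List.min?_id_cons, Option.getD_some]
  norm_num [List.getD_cons_zero, List.getD_cons_succ]
  rw [cand_fold_eq0 (sq_pairwise _) _ (sq_pairwise _),
      cand_fold_eq0 (sq_pairwise _) _ (sq_pairwise _),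
      cand_fold_eq0 (sq_pairwise _) _ (sq_pairwise _),
      cand_fold_eq0 (sq_pairwise _) _ (sq_pairwise _)]
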